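-- pv_equiv track=rewrite | github.com/enjoylonelines/algorithm-js | 프로그래머스/2/42586. 기능개발/기능개발.py | solution
-- ===== SOURCE A (Python) =====
-- def solution(progresses, speeds):
--     answer = []
--     while progresses:
--         cnt = 0
--         for idx in range(len(progresses)):
--             progresses[idx] += speeds[idx]
--         while progresses and progresses[0] >= 100:
--             progresses.pop(0)
--             speeds.pop(0)
--             cnt += 1
--         if cnt > 0: answer.append(cnt)
--     return answer
-- ===== SOURCE B (Python) =====
-- def solution(progresses, speeds):
--     answer = []
--     cur = 0
--     cnt = 0
--     for p, s in zip(progresses, speeds):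
--         d = max(1, -((p - 100) // s))
--         if d > cur:
--             if cnt:
--                 answer.append(cnt)
--             cur, cnt = d, 1
--         else:
--             cnt += 1
--     if cnt:
--         answer.append(cnt)
--     return answer
-- ===== Notes on version B (the rewrite author's own statement) =====
-- stated objective: faster
-- what changed: A simulates the process day by day (adding every speed to every remaining task each day and popping finished tasks from the front); B computes each task's completion day in closed form with ceiling division and groups the tasks in one pass by the running maximum day; intended as faster (a timing run saw A time out where B returned but could not measure a ratio).
-- outside the precondition, e.g. on solution([150, 10], [-10, 30]): A returns [1, 1], B returns [2]; on solution([100], [0]): A returns [1], B raises ZeroDivisionError; on solution([50], []): A raises IndexError, B returns []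
import Mathlib
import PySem

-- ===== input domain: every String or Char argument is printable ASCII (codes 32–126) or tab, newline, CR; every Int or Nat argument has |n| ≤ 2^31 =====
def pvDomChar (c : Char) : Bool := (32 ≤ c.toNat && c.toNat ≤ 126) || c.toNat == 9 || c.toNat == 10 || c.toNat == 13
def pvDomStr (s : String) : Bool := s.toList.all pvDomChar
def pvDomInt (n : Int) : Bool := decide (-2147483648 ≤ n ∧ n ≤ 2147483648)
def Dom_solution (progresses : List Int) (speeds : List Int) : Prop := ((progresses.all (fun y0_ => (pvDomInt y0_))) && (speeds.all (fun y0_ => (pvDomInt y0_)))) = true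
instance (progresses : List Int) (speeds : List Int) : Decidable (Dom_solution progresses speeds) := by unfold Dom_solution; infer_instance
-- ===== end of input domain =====

-- B replaces A's day-by-day simulation (repeated pointwise adds and front pops) by computing each
-- task's completion day in closed form and grouping in one pass by the running maximum day;
-- intended as faster (a timing run saw A time out at n=16 where B returned, but could not
-- measure a clean ratio).
-- NOTE: Python A mutates its argument lists in place (pops them empty); the equivalence proved here
-- is about the RETURN value only.

-- ===== PORT A =====
-- inner 'while progresses and progresses[0] >= 100: pop; pop; cnt += 1'
def popDone : List Int → List Int → Int × List Int × List Int
  | p :: ps, s :: ss =>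
      if p ≥ 100 then
        let r := popDone ps ss
        (r.1 + 1, r.2.1, r.2.2)
      else (0, p :: ps, s :: ss)
  | ps, ss => (0, ps, ss)

-- outer 'while progresses:' — one recursive call per simulated day; the Nat fuel is only a
-- termination guard (with non-positive speeds Python A diverges; such inputs are outside Pre_).
def loopA : Nat → List Int → List Int → List Int → List Int
  | _, [], _, acc => acc
  | 0, _ :: _, _, acc => acc
  | f + 1, p :: ps, ss, acc =>
      let ps1 := List.zipWith (· + ·) (p :: ps) ss
      let r := popDone ps1 ss
      loopA f r.2.1 r.2.2 (if r.1 > 0 then acc ++ [r.1] else acc)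

-- fuel bound: enough simulated days for every admitted input (each task needs ≤ max 1 (100-p) days)
def fuelA (ps : List Int) : Nat := ps.foldr (fun p m => max (100 - p).toNat m) 1

def solution (progresses : List Int) (speeds : List Int) : List Int :=
  loopA (fuelA progresses) progresses speeds []

-- ===== PORT B =====
-- completion day of one task: max(1, -((p - 100) // s))
def dayOf (p s : Int) : Int := max 1 (-(PySem.Int.floordiv (p - 100) s))

-- the grouping fold of Source B: running group day 'cur', open count 'cnt'
def groupB : List Int → Int → Int → List Int → List Int
  | [], _, cnt, acc => if cnt > 0 then acc ++ [cnt] else acc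
  | d :: rest, cur, cnt, acc =>
      if d > cur then groupB rest d 1 (if cnt > 0 then acc ++ [cnt] else acc)
      else groupB rest cur (cnt + 1) acc

def solution_alt (progresses : List Int) (speeds : List Int) : List Int :=
  groupB (List.zipWith dayOf progresses speeds) 0 0 []

-- ===== PRECONDITION & SPEC =====
-- Pre_ excludes inputs where Python A raises IndexError (fewer speeds than progresses) and the
-- inputs with a non-positive speed among the used ones: there A diverges except in corner cases
-- (progress already ≥ 100) on which B's closed-form day is undefined (s = 0) or different (s < 0).
def Pre_solution (progresses : List Int) (speeds : List Int) : Prop :=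
  progresses.length ≤ speeds.length ∧ ∀ pr ∈ progresses.zip speeds, 0 < pr.2
instance (progresses : List Int) (speeds : List Int) : Decidable (Pre_solution progresses speeds) := by
  unfold Pre_solution; infer_instance

def pvWitness_solution : List Int × List Int := ([93, 30, 55], [1, 30, 5])

def Spec_solution (progresses : List Int) (speeds : List Int) (out : List Int) : Prop := out = solution_alt progresses speeds
instance (progresses : List Int) (speeds : List Int) (out : List Int) : Decidable (Spec_solution progresses speeds out) := by unfold Spec_solution; infer_instance

-- ===== CLAIM (what is proved, stated in full; the proofs are below) =====
def Claim_equal_solution : Prop := ∀ (progresses : List Int) (speeds : List Int), Dom_solution progresses speeds → Pre_solution progresses speeds → Spec_solution progresses speeds (solution progresses speeds)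

-- ===== LEMMAS AND PROOFS =====

-- reference grouping: groups of the days list delimited by strict records (left-to-right maxima)
def recGroup : List Int → List Int → List Int
  | [], acc => acc
  | d :: rest, acc =>
      recGroup (rest.dropWhile (· ≤ d)) (acc ++ [((rest.takeWhile (· ≤ d)).length : Int) + 1])
termination_by l _ => l.length
decreasing_by simpa using Nat.lt_succ_of_le (List.length_dropWhile_le _ _)

-- decrement of a day after one simulated day
def dec (d : Int) : Int := max 1 (d - 1)

-- arithmetic facts about dayOf (0 < s)
theorem dayOf_pos (p s : Int) : 1 ≤ dayOf p s := le_max_left _ _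

theorem dayOf_le_one_iff (p s : Int) (hs : 0 < s) : dayOf p s ≤ 1 ↔ 100 ≤ p + s := by
  have h : (-1 : Int) ≤ PySem.Int.floordiv (p - 100) s ↔ (-1) * s ≤ p - 100 :=
    PySem.Int.le_floordiv_iff_mul_le hs
  unfold dayOf
  omega

theorem dayOf_add (p s : Int) (hs : 0 < s) : dayOf (p + s) s = dec (dayOf p s) := by
  have hb := (PySem.Int.floordiv_eq_iff_of_pos (a := p - 100) hs
    (q := PySem.Int.floordiv (p - 100) s)).mp rfl
  have key : PySem.Int.floordiv (p + s - 100) s = PySem.Int.floordiv (p - 100) s + 1 := by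
    refine (PySem.Int.floordiv_eq_iff_of_pos hs).mpr ⟨?_, ?_⟩ <;> nlinarith [hb.1, hb.2]
  unfold dayOf dec
  rw [key]
  omega

theorem dayOf_le_bound (p s : Int) (hs : 0 < s) : dayOf p s ≤ max 1 (100 - p) := by
  have h1 : (p - 100 : Int) ≤ PySem.Int.floordiv (p - 100) s ↔ (p - 100) * s ≤ p - 100 :=
    PySem.Int.le_floordiv_iff_mul_le hs
  have h2 : (-1 : Int) ≤ PySem.Int.floordiv (p - 100) s ↔ (-1) * s ≤ p - 100 :=
    PySem.Int.le_floordiv_iff_mul_le hs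
  unfold dayOf
  by_cases hp : 100 ≤ p
  · have : (-1 : Int) ≤ PySem.Int.floordiv (p - 100) s := h2.mpr (by nlinarith)
    omega
  · have : (p - 100 : Int) ≤ PySem.Int.floordiv (p - 100) s := h1.mpr (by nlinarith)
    omega

-- small list utilities -------------------------------------------------------

theorem dropWhile_eq_drop_len {α : Type} (p : α → Bool) (l : List α) :
    l.dropWhile p = l.drop (l.takeWhile p).length := by
  induction l with
  | nil => rfl
  | cons x xs ih =>
    by_cases h : p x = true <;> simp [List.takeWhile, List.dropWhile, h, ih]

theorem zip_drop_pos (k : Nat) : ∀ (ps ss : List Int),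
    (∀ pr ∈ ps.zip ss, 0 < pr.2) → ∀ pr ∈ (ps.drop k).zip (ss.drop k), 0 < pr.2 := by
  induction k with
  | zero => intro ps ss h; simpa using h
  | succ k ih =>
    intro ps ss h pr hpr
    match ps, ss with
    | [], _ => simp at hpr
    | _ :: _, [] => simp at hpr
    | p :: ps', s :: ss' =>
      exact ih ps' ss' (fun q hq => h q (by simp [hq])) pr hpr

theorem zip_add_pos : ∀ (ps ss : List Int),
    (∀ pr ∈ ps.zip ss, 0 < pr.2) → ∀ pr ∈ (List.zipWith (· + ·) ps ss).zip ss, 0 < pr.2 := by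
  intro ps
  induction ps with
  | nil => intro ss _ pr hpr; simp at hpr
  | cons p ps' ih =>
    intro ss h pr hpr
    match ss with
    | [] => simp at hpr
    | s :: ss' =>
      simp only [List.zipWith, List.zip_cons_cons, List.mem_cons] at hpr
      rcases hpr with h1 | h2
      · subst h1; exact h (p, s) (by simp)
      · exact ih ss' (fun q hq => h q (by simp [hq])) pr h2

-- days of the advanced state, positivity, takeWhile correspondence ------------

theorem days_pos : ∀ (ps ss : List Int) (d : Int), d ∈ List.zipWith dayOf ps ss → 1 ≤ d := by
  intro ps
  induction ps with
  | nil => intro ss d hd; simp at hd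
  | cons p ps' ih =>
    intro ss d hd
    match ss with
    | [] => simp at hd
    | s :: ss' =>
      rcases (by simpa using hd : d = dayOf p s ∨ d ∈ List.zipWith dayOf ps' ss') with h | h
      · subst h; exact dayOf_pos p s
      · exact ih ss' d h

theorem days_add : ∀ (ps ss : List Int), (∀ pr ∈ ps.zip ss, 0 < pr.2) →
    List.zipWith dayOf (List.zipWith (· + ·) ps ss) ss = (List.zipWith dayOf ps ss).map dec := by
  intro ps
  induction ps with
  | nil => intro ss _; simp
  | cons p ps' ih =>
    intro ss h
    match ss with
    | [] => simp
    | s :: ss' =>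
      have hs : 0 < s := h (p, s) (by simp)
      simp only [List.zipWith, List.map]
      rw [dayOf_add p s hs, ih ss' (fun q hq => h q (by simp [hq]))]

theorem takeWhile_len_eq : ∀ (ps ss : List Int), (∀ pr ∈ ps.zip ss, 0 < pr.2) →
    ((List.zipWith (· + ·) ps ss).takeWhile (fun x => decide (100 ≤ x))).length =
    ((List.zipWith dayOf ps ss).takeWhile (fun d => decide (d ≤ 1))).length := by
  intro ps
  induction ps with
  | nil => intro ss _; simp
  | cons p ps' ih =>
    intro ss h
    match ss with
    | [] => simp
    | s :: ss' =>
      have hs : 0 < s := h (p, s) (by simp)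
      have hiff : (100 ≤ p + s) ↔ dayOf p s ≤ 1 := (dayOf_le_one_iff p s hs).symm
      by_cases hc : 100 ≤ p + s
      · have hd : dayOf p s ≤ 1 := hiff.mp hc
        simp [hc, hd, ih ss' (fun q hq => h q (by simp [hq]))]
      · have hd : ¬ dayOf p s ≤ 1 := fun hh => hc (hiff.mpr hh)
        simp [hc, hd]

-- characterisation of popDone -------------------------------------------------

theorem popDone_spec : ∀ (qs ts : List Int), qs.length ≤ ts.length →
    popDone qs ts = (((qs.takeWhile (fun x => decide (100 ≤ x))).length : Int),
      qs.drop (qs.takeWhile (fun x => decide (100 ≤ x))).length,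
      ts.drop (qs.takeWhile (fun x => decide (100 ≤ x))).length) := by
  intro qs
  induction qs with
  | nil => intro ts _; simp [popDone]
  | cons q qs' ih =>
    intro ts hlen
    match ts with
    | [] => simp at hlen
    | t :: ts' =>
      by_cases hq : 100 ≤ q
      · have := ih ts' (by simpa using hlen)
        simp [popDone, hq, this]
      · simp [popDone, hq]

-- maxDay: fuel bound ----------------------------------------------------------

def maxDay (D : List Int) : Nat := D.foldr (fun d m => max d.toNat m) 0

theorem mem_le_maxDay {D : List Int} {d : Int} (h : d ∈ D) : d.toNat ≤ maxDay D := by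
  induction D with
  | nil => simp at h
  | cons x xs ih =>
    rcases (by simpa using h : d = x ∨ d ∈ xs) with h1 | h1
    · subst h1; exact le_max_left _ _
    · exact le_trans (ih h1) (le_max_right _ _)

theorem maxDay_le {D : List Int} {n : Nat} (h : ∀ d ∈ D, d.toNat ≤ n) : maxDay D ≤ n := by
  induction D with
  | nil => simp [maxDay]
  | cons x xs ih =>
    simp only [maxDay, List.foldr] at *
    exact max_le (h x (by simp)) (ih (fun d hd => h d (by simp [hd])))

theorem fuelA_pos (ps : List Int) : 1 ≤ fuelA ps := by
  induction ps with
  | nil => simp [fuelA]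
  | cons p ps' ih => exact le_trans ih (le_max_right _ _) |>.trans (le_of_eq rfl)

theorem maxDay_le_fuelA : ∀ (ps ss : List Int), (∀ pr ∈ ps.zip ss, 0 < pr.2) →
    maxDay (List.zipWith dayOf ps ss) ≤ fuelA ps := by
  intro ps
  induction ps with
  | nil => intro ss _; simp [maxDay]
  | cons p ps' ih =>
    intro ss h
    match ss with
    | [] =>
      simp only [List.zipWith_nil_right]
      exact le_trans (by simp [maxDay]) (Nat.zero_le _)
    | s :: ss' =>
      have hs : 0 < s := h (p, s) (by simp)
      have h1 : (dayOf p s).toNat ≤ (max (1 : Int) (100 - p)).toNat :=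
        Int.toNat_le_toNat (dayOf_le_bound p s hs)
      have h2 : (max (1 : Int) (100 - p)).toNat = max 1 (100 - p).toNat := by omega
      have ih' := ih ss' (fun q hq => h q (by simp [hq]))
      have hf := fuelA_pos ps'
      have goal_eq : maxDay (List.zipWith dayOf (p :: ps') (s :: ss')) =
          max (dayOf p s).toNat (maxDay (List.zipWith dayOf ps' ss')) := rfl
      have fe : fuelA (p :: ps') = max (100 - p).toNat (fuelA ps') := rfl
      rw [goal_eq, fe]
      omega

theorem takeWhile_congr' {α : Type} (p q : α → Bool) : ∀ (l : List α),
    (∀ x ∈ l, p x = q x) → l.takeWhile p = l.takeWhile q := by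
  intro l
  induction l with
  | nil => intro _; rfl
  | cons x xs ih =>
    intro h
    simp only [List.takeWhile, h x (by simp)]
    cases hq : q x <;> simp [ih (fun y hy => h y (by simp [hy]))]

theorem dropWhile_congr' {α : Type} (p q : α → Bool) : ∀ (l : List α),
    (∀ x ∈ l, p x = q x) → l.dropWhile p = l.dropWhile q := by
  intro l
  induction l with
  | nil => intro _; rfl
  | cons x xs ih =>
    intro h
    simp only [List.dropWhile, h x (by simp)]
    cases hq : q x <;> simp [ih (fun y hy => h y (by simp [hy]))]

-- recGroup lemmas -------------------------------------------------------------

theorem recGroup_map_dec (X : List Int) (acc : List Int)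
    (h1 : ∀ e ∈ X, 1 ≤ e) (h2 : ∀ h ∈ X.head?, 2 ≤ h) :
    recGroup (X.map dec) acc = recGroup X acc := by
  match X with
  | [] => rfl
  | d :: rest =>
    have hd2 : (2 : Int) ≤ d := h2 d (by simp)
    have hdec : dec d = d - 1 := by unfold dec; omega
    have htw : (List.map dec rest).takeWhile (fun e => decide (e ≤ dec d))
        = (rest.takeWhile (fun x => decide (x ≤ d))).map dec := by
      rw [List.takeWhile_map]
      congr 1
      apply takeWhile_congr'
      intro x hx
      have hx1 : (1 : Int) ≤ x := h1 x (by simp [hx])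
      simp only [Function.comp_apply, decide_eq_decide]
      unfold dec
      omega
    have hdw : (List.map dec rest).dropWhile (fun e => decide (e ≤ dec d))
        = (rest.dropWhile (fun x => decide (x ≤ d))).map dec := by
      rw [List.dropWhile_map]
      congr 1
      apply dropWhile_congr'
      intro x hx
      have hx1 : (1 : Int) ≤ x := h1 x (by simp [hx])
      simp only [Function.comp_apply, decide_eq_decide]
      unfold dec
      omega
    have hZlt : (rest.dropWhile (fun x => decide (x ≤ d))).length < (d :: rest).length :=
      Nat.lt_succ_of_le (List.length_dropWhile_le _ _)
    have hrec := recGroup_map_dec (rest.dropWhile (fun x => decide (x ≤ d)))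
      (acc ++ [((rest.takeWhile (fun x => decide (x ≤ d))).length : Int) + 1])
      (fun e he => h1 e (by
        exact List.mem_cons_of_mem _ ((List.dropWhile_sublist _).subset he)))
      (by
        intro h hh
        match hZ : rest.dropWhile (fun x => decide (x ≤ d)) with
        | [] => rw [hZ] at hh; simp at hh
        | z :: zs =>
          rw [hZ] at hh
          simp only [List.head?_cons, Option.mem_some_iff] at hh
          subst hh
          have hfalse := List.head_dropWhile_not (fun x => decide (x ≤ d)) (l := rest)
            (by rw [hZ]; simp)
          simp only [hZ, List.head_cons, decide_eq_false_iff_not, not_le] at hfalse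
          omega)
    simp only [List.map, recGroup]
    rw [htw, hdw, List.length_map]
    exact hrec
termination_by X.length
decreasing_by exact hZlt

theorem recGroup_pop (D : List Int) (acc : List Int) (hpos : ∀ e ∈ D, 1 ≤ e)
    (hk : 0 < (D.takeWhile (fun d => decide (d ≤ 1))).length) :
    recGroup D acc =
      recGroup ((D.drop (D.takeWhile (fun d => decide (d ≤ 1))).length).map dec)
        (acc ++ [((D.takeWhile (fun d => decide (d ≤ 1))).length : Int)]) := by
  match D with
  | [] => simp at hk
  | d :: rest =>
    have hd1 : d ≤ 1 := by
      by_contra hcon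
      have : (decide (d ≤ 1)) = false := decide_eq_false hcon
      simp [List.takeWhile_cons, this] at hk
    have hd : d = 1 := le_antisymm hd1 (hpos d (by simp))
    subst hd
    have htw1 : (decide ((1 : Int) ≤ 1)) = true := by decide
    have hZsub : ∀ e ∈ rest.dropWhile (fun x => decide (x ≤ 1)), (1 : Int) ≤ e :=
      fun e he => hpos e (List.mem_cons_of_mem _ ((List.dropWhile_sublist _).subset he))
    have hZhead : ∀ h ∈ (rest.dropWhile (fun x => decide (x ≤ 1))).head?, 2 ≤ h := by
      intro h hh
      match hZ : rest.dropWhile (fun x => decide (x ≤ 1)) with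
      | [] => rw [hZ] at hh; simp at hh
      | z :: zs =>
        rw [hZ] at hh
        simp only [List.head?_cons, Option.mem_some_iff] at hh
        subst hh
        have hfalse := List.head_dropWhile_not (fun x => decide (x ≤ 1)) (l := rest)
          (by rw [hZ]; simp)
        simp only [hZ, List.head_cons, decide_eq_false_iff_not, not_le] at hfalse
        omega
    simp only [recGroup, List.takeWhile_cons, htw1, if_true, List.length_cons]
    rw [show ((1 : Int) :: rest).drop ((rest.takeWhile (fun x => decide (x ≤ 1))).length + 1)
          = rest.drop (rest.takeWhile (fun x => decide (x ≤ 1))).length from rfl,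
        ← dropWhile_eq_drop_len, recGroup_map_dec _ _ hZsub hZhead]
    all_goals congr 1 <;> push_cast [List.append_cancel_left_eq, List.cons.injEq]

-- A-side main lemma -----------------------------------------------------------

theorem loopA_eq : ∀ (fuel : Nat) (ps ss acc : List Int), ps.length ≤ ss.length →
    (∀ pr ∈ ps.zip ss, 0 < pr.2) → maxDay (List.zipWith dayOf ps ss) ≤ fuel →
    loopA fuel ps ss acc = recGroup (List.zipWith dayOf ps ss) acc := by
  intro fuel
  induction fuel with
  | zero =>
    intro ps ss acc hlen hpos hfu
    match ps, ss with
    | [], ss => simp [loopA, recGroup]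
    | p :: ps', [] => simp at hlen
    | p :: ps', s :: ss' =>
      exfalso
      have h1 : dayOf p s ∈ List.zipWith dayOf (p :: ps') (s :: ss') := by
        simp [List.zipWith]
      have h2 := mem_le_maxDay h1
      have h3 := dayOf_pos p s
      omega
  | succ f ih =>
    intro ps ss acc hlen hpos hfu
    match ps, ss with
    | [], ss => simp [loopA, recGroup]
    | p :: ps', [] => simp at hlen
    | p :: ps', s :: ss' =>
      have hA1len : (List.zipWith (· + ·) (p :: ps') (s :: ss')).length ≤ (s :: ss').length := by
        simp [List.length_zipWith]
      -- one day of the simulation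
      have hstep : loopA (f + 1) (p :: ps') (s :: ss') acc
          = loopA f ((List.zipWith (· + ·) (p :: ps') (s :: ss')).drop
                (((List.zipWith (· + ·) (p :: ps') (s :: ss')).takeWhile
                  (fun x => decide (100 ≤ x))).length))
              ((s :: ss').drop
                (((List.zipWith (· + ·) (p :: ps') (s :: ss')).takeWhile
                  (fun x => decide (100 ≤ x))).length))
              (if ((((List.zipWith (· + ·) (p :: ps') (s :: ss')).takeWhile
                      (fun x => decide (100 ≤ x))).length : Int)) > 0 then
                acc ++ [(((List.zipWith (· + ·) (p :: ps') (s :: ss')).takeWhile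
                      (fun x => decide (100 ≤ x))).length : Int)]
              else acc) := by
        simp only [loopA]
        rw [popDone_spec _ _ hA1len]
      set A1 := List.zipWith (· + ·) (p :: ps') (s :: ss') with hA1
      set D := List.zipWith dayOf (p :: ps') (s :: ss') with hD
      set k := (A1.takeWhile (fun x => decide (100 ≤ x))).length with hk
      have hk'k : k = (D.takeWhile (fun d => decide (d ≤ 1))).length := takeWhile_len_eq _ _ hpos
      -- days of the new state
      have hpos' : ∀ pr ∈ A1.zip (s :: ss'), 0 < pr.2 := zip_add_pos _ _ hpos
      have hdays : List.zipWith dayOf (A1.drop k) ((s :: ss').drop k)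
          = (D.drop k).map dec := by
        calc List.zipWith dayOf (A1.drop k) ((s :: ss').drop k)
            = (List.zipWith dayOf A1 (s :: ss')).drop k := List.drop_zipWith.symm
          _ = (D.map dec).drop k := by rw [days_add _ _ hpos, hD]
          _ = (D.drop k).map dec := List.map_drop.symm
      have hDpos : ∀ e ∈ D, 1 ≤ e := fun e he => days_pos _ _ e he
      -- head of the remainder after the pops is a day ≥ 2
      have hhead2 : ∀ h' ∈ (D.drop k).head?, 2 ≤ h' := by
        intro h' hh
        match hZ : D.drop k with
        | [] => rw [hZ] at hh; simp at hh
        | z :: zs =>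
          rw [hZ] at hh
          simp only [List.head?_cons, Option.mem_some_iff] at hh
          have hdw : D.drop k = D.dropWhile (fun d => decide (d ≤ 1)) := by
            rw [dropWhile_eq_drop_len, ← hk'k]
          have hne : D.dropWhile (fun d => decide (d ≤ 1)) ≠ [] := by
            rw [← hdw, hZ]; simp
          have hfalse := List.head_dropWhile_not (fun d => decide (d ≤ 1)) hne
          have heq : D.dropWhile (fun d => decide (d ≤ 1)) = z :: zs := hdw.symm.trans hZ
          simp only [heq, List.head_cons, decide_eq_false_iff_not, not_le] at hfalse
          omega
      -- fuel bound for the recursive call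
      have hmax' : maxDay ((D.drop k).map dec) ≤ f := by
        match hZ : D.drop k with
        | [] => simp [maxDay]
        | z :: zs =>
          have hz2 : 2 ≤ z := hhead2 z (by rw [hZ]; simp)
          have hzD : z ∈ D := List.mem_of_mem_drop (l := D) (i := k) (by rw [hZ]; simp)
          have hm2 : 2 ≤ maxDay D := by
            have := mem_le_maxDay hzD; omega
          apply maxDay_le
          intro d' hd'
          rcases List.mem_map.mp (by rw [hZ]; exact hd' : d' ∈ (D.drop k).map dec) with ⟨e, he, hde⟩
          have heD : e ∈ D := List.mem_of_mem_drop he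
          have he1 : (1 : Int) ≤ e := hDpos e heD
          have hem := mem_le_maxDay heD
          subst hde
          unfold dec
          omega
      have hlen' : (A1.drop k).length ≤ ((s :: ss').drop k).length := by
        simp only [List.length_drop, hA1, List.length_zipWith, List.length_cons]
        simp only [List.length_cons] at hlen
        omega
      have hpos'' : ∀ pr ∈ (A1.drop k).zip ((s :: ss').drop k), 0 < pr.2 :=
        zip_drop_pos k _ _ hpos'
      have hih := ih (A1.drop k) ((s :: ss').drop k)
        (if (k : Int) > 0 then acc ++ [(k : Int)] else acc) hlen' hpos''
        (by rw [hdays]; exact hmax')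
      rw [hstep, hih, hdays]
      by_cases hk0 : k = 0
      · -- no task finished this day
        have hhd : ∀ h' ∈ D.head?, 2 ≤ h' := by
          intro h' hh
          have hD0 : D = dayOf p s :: List.zipWith dayOf ps' ss' := rfl
          rw [hD0] at hh
          simp only [List.head?_cons, Option.mem_some_iff] at hh
          subst hh
          by_contra hcon
          have hle : dayOf p s ≤ 1 := by omega
          have hlen1 : 0 < (D.takeWhile (fun d => decide (d ≤ 1))).length := by
            rw [hD0]
            simp [List.takeWhile_cons, hle]
          omega
        rw [hk0]
        simp only [List.drop_zero, Nat.cast_zero, gt_iff_lt, lt_self_iff_false, if_false]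
        exact recGroup_map_dec D acc hDpos hhd
      · have hkpos : ((k : Int)) > 0 := by
          have : 0 < k := Nat.pos_of_ne_zero hk0
          exact_mod_cast this
        rw [if_pos hkpos]
        have hpop := recGroup_pop D acc hDpos (by omega)
        rw [hpop, ← hk'k]

-- B-side main lemmas ----------------------------------------------------------

theorem groupB_open : ∀ (ds : List Int) (cur cnt : Int) (acc : List Int), 0 < cnt →
    groupB ds cur cnt acc =
      recGroup (ds.dropWhile (fun d => decide (d ≤ cur)))
        (acc ++ [cnt + ((ds.takeWhile (fun d => decide (d ≤ cur))).length : Int)]) := by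
  intro ds
  induction ds with
  | nil => intro cur cnt acc hcnt; simp [groupB, recGroup, hcnt]
  | cons d rest ih =>
    intro cur cnt acc hcnt
    by_cases hd : d > cur
    · have hdb : (decide (d ≤ cur)) = false := decide_eq_false (not_le.mpr hd)
      rw [show groupB (d :: rest) cur cnt acc
            = groupB rest d 1 (if cnt > 0 then acc ++ [cnt] else acc) from by simp [groupB, hd],
          if_pos hcnt, ih d 1 (acc ++ [cnt]) one_pos]
      simp only [List.takeWhile_cons, List.dropWhile_cons, hdb, Bool.false_eq_true, if_false,
        List.length_nil, Int.natCast_zero, add_zero, recGroup]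
      congr 1
      simp only [List.append_cancel_left_eq, List.cons.injEq, and_true]
      push_cast; ring
    · have hdb : (decide (d ≤ cur)) = true := decide_eq_true (not_lt.mp hd)
      rw [show groupB (d :: rest) cur cnt acc = groupB rest cur (cnt + 1) acc from by
            simp [groupB, hd],
          ih cur (cnt + 1) acc (by omega)]
      simp only [List.takeWhile_cons, List.dropWhile_cons, hdb, if_true, List.length_cons]
      congr 1
      simp only [List.append_cancel_left_eq, List.cons.injEq, and_true]
      push_cast; ring

theorem groupB_eq (ds acc : List Int) (h : ∀ d ∈ ds, 1 ≤ d) :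
    groupB ds 0 0 acc = recGroup ds acc := by
  match ds with
  | [] => simp [groupB, recGroup]
  | d :: rest =>
    have hd : d > 0 := h d (by simp)
    rw [show groupB (d :: rest) 0 0 acc = groupB rest d 1 acc from by simp [groupB, hd],
        groupB_open rest d 1 acc one_pos]
    simp only [recGroup]
    congr 1
    simp only [List.append_cancel_left_eq, List.cons.injEq, and_true]
    push_cast; ring

-- ===== VERDICT =====
theorem solution_spec : Claim_equal_solution := by
  intro ps ss _ hpre
  unfold Spec_solution solution solution_alt
  rw [loopA_eq (fuelA ps) ps ss [] hpre.1 hpre.2 (maxDay_le_fuelA ps ss hpre.2)]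
  rw [groupB_eq _ _ (days_pos ps ss)]
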